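-- pv_equiv track=rewrite | github.com/AlexisTrouve/vba-mcp-server | packages/pro/src/vba_mcp_pro/tools/inject.py | _normalize_vba_code
-- ===== SOURCE A (Python) =====
-- def _normalize_vba_code(code: str, strip_access_defaults: bool = True) -> str:
--     """
--     Normalize VBA code for comparison.
--
--     VBA editor may add/remove blank lines, normalize whitespace, etc.
--     This function normalizes code to make comparison more reliable.
--
--     Args:
--         code: VBA code to normalize
--         strip_access_defaults: If True, strip Access-specific default lines
--                               like "Option Compare Database" that Access adds
--                               automatically to new modules
--
--     Returns:
--         Normalized code string
--     """
--     lines = code.splitlines()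
--     normalized_lines = []
--
--     # Access-specific lines that are automatically added
--     access_defaults = [
--         "Option Compare Database",
--         "Option Compare Text",
--         "Option Compare Binary",
--     ]
--
--     for line in lines:
--         stripped_line = line.strip()
--
--         # Skip Access default lines if requested
--         if strip_access_defaults and stripped_line in access_defaults:
--             continue
--
--         # Keep the line but strip trailing whitespace
--         # Don't strip leading whitespace as indentation matters in VBA
--         normalized_lines.append(line.rstrip())
--
--     # Remove leading and trailing blank lines
--     while normalized_lines and not normalized_lines[0].strip():
--         normalized_lines.pop(0)
--     while normalized_lines and not normalized_lines[-1].strip():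
--         normalized_lines.pop()
--
--     return '\n'.join(normalized_lines)
-- ===== SOURCE B (Python) =====
-- def _normalize_vba_code(code: str, strip_access_defaults: bool = True) -> str:
--     """Normalize VBA code for comparison (see original docstring)."""
--     access_defaults = (
--         "Option Compare Database",
--         "Option Compare Text",
--         "Option Compare Binary",
--     )
--     parts = []     # pieces of the final string
--     pending = 0    # blank lines seen since the last kept non-blank line
--     for line in code.splitlines():
--         s = line.strip()
--         if strip_access_defaults and s in access_defaults:
--             continue
--         if not s:
--             if parts:          # blanks before the first kept line never count
--                 pending += 1
--         else:
--             if parts:          # flush the buffered blank lines only now,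
--                 parts.append('\n' * (pending + 1))  # so trailing blanks never appear
--             parts.append(line.rstrip())
--             pending = 0
--     return ''.join(parts)
-- ===== Notes on version B (the rewrite author's own statement) =====
-- stated objective: alternative
-- what changed: Single forward pass that buffers blank lines in a counter and flushes them only when a later kept non-blank line arrives, so leading/trailing blank lines are never emitted and A's filter pass plus two while-pop edge-trimming loops disappear.
import Mathlib
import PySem

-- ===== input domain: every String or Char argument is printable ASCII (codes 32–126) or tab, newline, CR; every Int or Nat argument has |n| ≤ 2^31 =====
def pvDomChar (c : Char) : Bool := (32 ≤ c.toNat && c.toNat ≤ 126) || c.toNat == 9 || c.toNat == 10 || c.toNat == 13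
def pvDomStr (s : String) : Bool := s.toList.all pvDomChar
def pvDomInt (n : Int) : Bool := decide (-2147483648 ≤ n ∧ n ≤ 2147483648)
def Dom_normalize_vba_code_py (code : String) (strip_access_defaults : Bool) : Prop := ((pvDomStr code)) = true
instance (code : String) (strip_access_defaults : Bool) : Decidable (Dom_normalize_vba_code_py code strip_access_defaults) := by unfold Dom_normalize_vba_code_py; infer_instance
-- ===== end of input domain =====

-- B replaces A's filter pass plus two while-pop edge-trimming loops by a single
-- forward pass that buffers blank lines in a counter and flushes them only when a
-- later kept non-blank line arrives (objective: alternative).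

-- ===== PORT A =====
def pvAccessDefaults : List String :=
  ["Option Compare Database", "Option Compare Text", "Option Compare Binary"]

-- Python's 'while lst and not lst[0].strip(): lst.pop(0)' loop
def pvPopLeadingBlank : List String → List String
  | [] => []
  | l :: ls => if PySem.Str.strip l == "" then pvPopLeadingBlank ls else l :: ls

def normalize_vba_code_py (code : String) (strip_access_defaults : Bool) : String :=
  let lines := PySem.Str.splitlines code
  let normalized_lines : List String := lines.foldl (fun acc line =>
      if strip_access_defaults && pvAccessDefaults.contains (PySem.Str.strip line) then acc
      else acc ++ [PySem.Str.rstrip line]) []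
  let normalized_lines := pvPopLeadingBlank normalized_lines
  -- the trailing while-pop loop is the leading one on the reversed list
  let normalized_lines := (pvPopLeadingBlank normalized_lines.reverse).reverse
  PySem.Str.join "\n" normalized_lines

-- ===== PORT B =====
def pvAccessDefaultsSet : PySem.Set String :=
  PySem.Set.ofList ["Option Compare Database", "Option Compare Text", "Option Compare Binary"]

-- B's loop body, on state (parts, pending)
def pvStepB (sad : Bool) (st : List String × Nat) (line : String) : List String × Nat :=
  let s := PySem.Str.strip line
  if sad && pvAccessDefaultsSet.contains s then st
  else if s == "" then
    (if !st.1.isEmpty then (st.1, st.2 + 1) else st)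
  else
    -- '\n' * (pending + 1) is ported by hand as a replicate (exact for str * nat)
    ((if !st.1.isEmpty then st.1 ++ [String.ofList (List.replicate (st.2 + 1) '\n')] else st.1)
      ++ [PySem.Str.rstrip line], 0)

def normalize_vba_code_py_alt (code : String) (strip_access_defaults : Bool) : String :=
  let st := (PySem.Str.splitlines code).foldl (pvStepB strip_access_defaults) ([], 0)
  PySem.Str.join "" st.1

-- ===== PRECONDITION & SPEC =====
def Spec_normalize_vba_code_py (code : String) (strip_access_defaults : Bool) (out : String) : Prop := out = normalize_vba_code_py_alt code strip_access_defaults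
instance (code : String) (strip_access_defaults : Bool) (out : String) : Decidable (Spec_normalize_vba_code_py code strip_access_defaults out) := by unfold Spec_normalize_vba_code_py; infer_instance

-- ===== CLAIM (what is proved, stated in full; the proofs are below) =====
def Claim_equal_normalize_vba_code_py : Prop := ∀ (code : String) (strip_access_defaults : Bool), Dom_normalize_vba_code_py code strip_access_defaults → Spec_normalize_vba_code_py code strip_access_defaults (normalize_vba_code_py code strip_access_defaults)

-- ===== LEMMAS AND PROOFS =====

/-- `strip` and `rstrip` vanish together: both mean "all whitespace". -/
theorem pv_strip_nil_iff_rstrip_nil (l : List Char) :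
    (PySem.Chars.strip l = []) ↔ (PySem.Chars.rstrip l = []) := by
  simp only [PySem.Chars.strip, PySem.Chars.rstrip, PySem.Chars.lstrip,
    List.reverse_eq_nil_iff, List.dropWhile_eq_nil_iff, List.mem_reverse]
  constructor
  · intro h c hc
    rw [← List.takeWhile_append_dropWhile (p := PySem.Chars.isspace) (l := l)] at hc
    rcases List.mem_append.mp hc with h1 | h1
    · exact List.mem_takeWhile_imp h1
    · exact h c h1
  · intro h c hc
    exact h c ((List.dropWhile_sublist _).subset hc)

/-- String-level version of the previous lemma. -/
theorem pv_strip_empty_iff (m : String) :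
    (PySem.Str.strip m = "") ↔ (PySem.Str.rstrip m = "") := by
  rw [← String.toList_inj, ← String.toList_inj, PySem.Str.toList_strip, PySem.Str.toList_rstrip]
  exact pv_strip_nil_iff_rstrip_nil m.toList

theorem pv_rstrip_idem (m : String) :
    PySem.Str.rstrip (PySem.Str.rstrip m) = PySem.Str.rstrip m := by
  rw [← String.toList_inj, PySem.Str.toList_rstrip, PySem.Str.toList_rstrip]
  simp [PySem.Chars.rstrip, List.dropWhile_idempotent]

/-- On right-stripped lines, A's while-pop loop is `dropWhile (· == "")`. -/
theorem pv_pop_eq (ms : List String) (h : ∀ m ∈ ms, PySem.Str.rstrip m = m) :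
    pvPopLeadingBlank ms = ms.dropWhile (fun m => m == "") := by
  induction ms with
  | nil => rfl
  | cons m ms ih =>
    have hm : (PySem.Str.strip m == "") = (m == "") := by
      refine Bool.eq_iff_iff.mpr ?_
      simp only [beq_iff_eq]
      rw [pv_strip_empty_iff, h m (by simp)]
    rw [pvPopLeadingBlank, hm, List.dropWhile_cons]
    by_cases h0 : m = ""
    · simp only [beq_iff_eq, if_pos h0]
      exact ih (fun m' hm' => h m' (by simp [hm']))
    · simp [h0]

/-- `''.join` distributes over appending one piece. -/
theorem pv_join_empty_snoc (xs : List String) (y : String) :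
    PySem.Str.join "" (xs ++ [y]) = PySem.Str.join "" xs ++ y := by
  rw [← String.toList_inj, String.toList_append, PySem.Str.toList_join, PySem.Str.toList_join]
  have hsep : ("" : String).toList = [] := rfl
  rw [hsep]
  have flat : ∀ ls : List (List Char), PySem.Chars.join [] ls = ls.flatten := by
    intro ls
    induction ls with
    | nil => rfl
    | cons a t ih =>
      cases t with
      | nil => simp [PySem.Chars.join_singleton]
      | cons b t' => rw [PySem.Chars.join_cons_cons, ih]; simp
  rw [List.map_append, flat, flat]
  simp

theorem pv_join_append (sep : List Char) (xs ys : List (List Char)) (hx : xs ≠ []) (hy : ys ≠ []) :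
    PySem.Chars.join sep (xs ++ ys) = PySem.Chars.join sep xs ++ sep ++ PySem.Chars.join sep ys := by
  induction xs with
  | nil => exact absurd rfl hx
  | cons a xs ih =>
    cases xs with
    | nil =>
      cases ys with
      | nil => exact absurd rfl hy
      | cons b t => simp [PySem.Chars.join_singleton, PySem.Chars.join_cons_cons]
    | cons a' xs' =>
      rw [List.cons_append, List.cons_append, PySem.Chars.join_cons_cons,
        ← List.cons_append, ih (by simp), PySem.Chars.join_cons_cons]
      simp [List.append_assoc]

theorem pv_join_blanks_snoc (p : Nat) (r : List Char) :
    PySem.Chars.join ['\n'] (List.replicate p [] ++ [r]) = List.replicate p '\n' ++ r := by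
  induction p with
  | zero => simp [PySem.Chars.join_singleton]
  | succ p ih =>
    rw [List.replicate_succ, List.cons_append, List.replicate_succ]
    cases hp : List.replicate p ([] : List Char) ++ [r] with
    | nil => simp at hp
    | cons b t =>
      rw [PySem.Chars.join_cons_cons (rest := t), ← hp, ih]
      simp

/-- `'\n'.join` after appending the buffered blanks and one non-blank line. -/
theorem pv_join_nl_flush (ts : List String) (p : Nat) (r : String) (hts : ts ≠ []) :
    PySem.Str.join "\n" (ts ++ List.replicate p "" ++ [r])
      = PySem.Str.join "\n" ts ++ String.ofList (List.replicate (p + 1) '\n') ++ r := by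
  rw [← String.toList_inj]
  simp only [String.toList_append, PySem.Str.toList_join]
  have hsep : ("\n" : String).toList = ['\n'] := rfl
  have hofl : (String.ofList (List.replicate (p + 1) '\n')).toList = List.replicate (p + 1) '\n' := by simp
  rw [hsep, hofl, List.append_assoc, List.map_append,
    pv_join_append ['\n'] _ _ (by simpa using hts) (by simp)]
  have hemp : ("" : String).toList = [] := rfl
  have hmap : List.map String.toList (List.replicate p "" ++ [r])
      = List.replicate p ([] : List Char) ++ [r.toList] := by
    simp [List.map_append, List.map_replicate, hemp]
  rw [hmap, pv_join_blanks_snoc]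
  simp [List.replicate_succ, List.append_assoc]

-- B's loop body after the skip-filter, acting on an already right-stripped line `r`
def pvStepC (st : List String × Nat) (r : String) : List String × Nat :=
  if r == "" then (if !st.1.isEmpty then (st.1, st.2 + 1) else st)
  else ((if !st.1.isEmpty then st.1 ++ [String.ofList (List.replicate (st.2 + 1) '\n')] else st.1)
        ++ [r], 0)

/-- B's fold over the raw lines is the fold of `pvStepC` over A's kept, right-stripped lines. -/
theorem pv_fold_conv (sad : Bool) (lines : List String) (st : List String × Nat) :
    lines.foldl (pvStepB sad) st
    = ((lines.filter (fun line =>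
          !(sad && pvAccessDefaults.contains (PySem.Str.strip line)))).map
        (fun line => PySem.Str.rstrip line)).foldl pvStepC st := by
  induction lines generalizing st with
  | nil => rfl
  | cons line rest ih =>
    have hset : pvAccessDefaultsSet.contains (PySem.Str.strip line)
        = pvAccessDefaults.contains (PySem.Str.strip line) := rfl
    rw [List.foldl_cons, List.filter_cons]
    by_cases hk : (sad && pvAccessDefaults.contains (PySem.Str.strip line)) = true
    · have hstep : pvStepB sad st line = st := by
        simp only [pvStepB]
        rw [if_pos (show (sad && pvAccessDefaultsSet.contains (PySem.Str.strip line)) = true from hk)]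
      rw [hstep, if_neg (show ¬((!(sad && pvAccessDefaults.contains (PySem.Str.strip line))) = true) by rw [hk]; decide), ih]
    · have hkf : (sad && pvAccessDefaults.contains (PySem.Str.strip line)) = false :=
        Bool.eq_false_iff.mpr hk
      have hblank : (PySem.Str.strip line == "") = (PySem.Str.rstrip line == "") := by
        refine Bool.eq_iff_iff.mpr ?_
        simp only [beq_iff_eq]
        exact pv_strip_empty_iff line
      have hstep : pvStepB sad st line = pvStepC st (PySem.Str.rstrip line) := by
        simp only [pvStepB, pvStepC]
        rw [if_neg (show ¬((sad && pvAccessDefaultsSet.contains (PySem.Str.strip line)) = true) from hk), hblank]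
      rw [hstep, if_pos (show (!(sad && pvAccessDefaults.contains (PySem.Str.strip line))) = true by rw [hkf]; decide),
        List.map_cons, List.foldl_cons, ih]

-- trimming helpers used only to state the loop invariant
def pvBlank (r : String) : Bool := r == ""
def pvLead (ks : List String) : List String := ks.dropWhile pvBlank
def pvPend (ks : List String) : Nat := ((pvLead ks).reverse.takeWhile pvBlank).length
def pvTrim (ks : List String) : List String := ((pvLead ks).reverse.dropWhile pvBlank).reverse

/-- Loop invariant of B's pass: `pending` counts the trailing blank run of the
leading-trimmed prefix, and the joined parts equal the fully trimmed prefix joined. -/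
theorem pv_invariant (ks : List String) :
    let st := ks.foldl pvStepC ([], 0)
    st.2 = pvPend ks ∧ (st.1.isEmpty = (pvLead ks).isEmpty) ∧
      PySem.Str.join "" st.1 = PySem.Str.join "\n" (pvTrim ks) := by
  induction ks using List.reverseRecOn with
  | nil => exact ⟨rfl, rfl, rfl⟩
  | append_singleton ks r ih =>
    obtain ⟨h2, h1, hj⟩ := ih
    simp only [List.foldl_append, List.foldl_cons, List.foldl_nil]
    set st := ks.foldl pvStepC ([], 0) with hst
    have hleadapp : pvLead (ks ++ [r]) =
        if (pvLead ks).isEmpty then List.dropWhile pvBlank [r] else pvLead ks ++ [r] := by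
      simp [pvLead, List.dropWhile_append]
    by_cases hre : r = ""
    · -- r is a blank line: buffer it (or ignore it before the first kept line)
      subst hre
      have hr : pvBlank "" = true := by decide
      have hstep : pvStepC st "" = (if !st.1.isEmpty then (st.1, st.2 + 1) else st) := by
        simp [pvStepC]
      by_cases hpe : st.1.isEmpty = true
      · -- parts empty: prefix still all blank, nothing changes
        have hle : (pvLead ks).isEmpty = true := h1 ▸ hpe
        have hlead : pvLead (ks ++ [""]) = [] := by
          rw [hleadapp, if_pos hle]
          simp [hr]
        have htrim0 : pvTrim ks = [] := by
          simp [pvTrim, List.isEmpty_iff.mp hle]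
        have htrim : pvTrim (ks ++ [""]) = [] := by simp [pvTrim, hlead]
        rw [hstep, hpe, Bool.not_true, if_neg (by simp)]
        refine ⟨?_, ?_, ?_⟩
        · simp [pvPend, hlead, h2, pvPend, List.isEmpty_iff.mp hle]
        · simp [hpe, hlead]
        · rw [htrim, hj, htrim0]
      · -- parts nonempty: pending += 1
        have hpf : st.1.isEmpty = false := Bool.eq_false_iff.mpr hpe
        have hlne : (pvLead ks).isEmpty = false := h1 ▸ hpf
        have hlead : pvLead (ks ++ [""]) = pvLead ks ++ [""] := by
          rw [hleadapp, if_neg (by simp [hlne])]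
        rw [hstep, hpf, Bool.not_false, if_pos rfl]
        refine ⟨?_, ?_, ?_⟩
        · simp [pvPend, hlead, pvBlank, h2]
        · simp [hpf, hlead]
        · have : pvTrim (ks ++ [""]) = pvTrim ks := by
            simp [pvTrim, hlead, pvBlank]
          rw [this, hj]
    · -- r is a kept non-blank line: flush the buffered blanks
      have hr : pvBlank r = false := by simp [pvBlank, hre]
      have hlead : pvLead (ks ++ [r]) = pvLead ks ++ [r] := by
        rw [hleadapp]
        by_cases he : (pvLead ks).isEmpty = true
        · rw [if_pos he, List.isEmpty_iff.mp he]
          simp [hr]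
        · rw [if_neg he]
      have hpend : pvPend (ks ++ [r]) = 0 := by
        simp [pvPend, hlead, hr]
      have htrim : pvTrim (ks ++ [r]) = pvLead ks ++ [r] := by
        simp [pvTrim, hlead, hr]
      have hstep : pvStepC st r =
          ((if !st.1.isEmpty then st.1 ++ [String.ofList (List.replicate (st.2 + 1) '\n')] else st.1)
            ++ [r], 0) := by
        simp only [pvStepC, if_neg (show ¬((r == "") = true) by simp [hre])]
      rw [hstep, hpend, htrim]
      refine ⟨rfl, by rw [hlead]; cases st.1 <;> cases pvLead ks <;> simp, ?_⟩
      -- decompose pvLead ks = pvTrim ks ++ replicate pend ""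
      have hdec : pvLead ks = pvTrim ks ++ List.replicate (pvPend ks) "" := by
        have hrun : (pvLead ks).reverse.takeWhile pvBlank
            = List.replicate (pvPend ks) "" := by
          rw [List.eq_replicate_iff]
          refine ⟨rfl, fun b hb => ?_⟩
          have := List.mem_takeWhile_imp hb
          exact beq_iff_eq.mp this
        calc pvLead ks = ((pvLead ks).reverse.takeWhile pvBlank ++ (pvLead ks).reverse.dropWhile pvBlank).reverse := by
              rw [List.takeWhile_append_dropWhile, List.reverse_reverse]
          _ = pvTrim ks ++ List.replicate (pvPend ks) "" := by
              rw [List.reverse_append, hrun, List.reverse_replicate]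
              rfl
      by_cases hpe : st.1.isEmpty = true
      · -- parts empty: leading-trimmed prefix empty, result is just [r]
        have hle : (pvLead ks).isEmpty = true := h1 ▸ hpe
        have htrim0 : pvTrim ks = [] := by
          simp [pvTrim, List.isEmpty_iff.mp hle]
        rw [hpe, Bool.not_true, if_neg (by simp), List.isEmpty_iff.mp hpe, List.nil_append,
          List.isEmpty_iff.mp hle, List.nil_append]
        rfl
      · -- parts nonempty: pvLead ks nonempty, hence pvTrim ks nonempty
        have hpf : st.1.isEmpty = false := Bool.eq_false_iff.mpr hpe
        have hlne : (pvLead ks).isEmpty = false := h1 ▸ hpf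
        have htne : pvTrim ks ≠ [] := by
          intro h0
          rw [h0, List.nil_append] at hdec
          cases hl : pvLead ks with
          | nil => rw [hl] at hlne; simp at hlne
          | cons a t =>
            have ha : pvBlank a = false := by
              have hh := List.head?_dropWhile_not pvBlank ks
              rw [show List.dropWhile pvBlank ks = pvLead ks from rfl, hl] at hh
              simpa using hh
            have hmem : a ∈ pvLead ks := by rw [hl]; simp
            rw [hdec] at hmem
            have : a = "" := List.eq_of_mem_replicate hmem
            rw [this] at ha
            simp [pvBlank] at ha
        rw [hpf, Bool.not_false, if_pos rfl, pv_join_empty_snoc, pv_join_empty_snoc, hj, h2,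
          hdec, pv_join_nl_flush _ _ _ htne]

-- ===== VERDICT (by name: the statement is the Claim_ definition above) =====
theorem normalize_vba_code_py_spec : Claim_equal_normalize_vba_code_py := by
  intro code sad _hdom
  unfold Spec_normalize_vba_code_py normalize_vba_code_py normalize_vba_code_py_alt
  have hfun : (fun (acc : List String) line =>
      if sad && pvAccessDefaults.contains (PySem.Str.strip line) then acc
      else acc ++ [PySem.Str.rstrip line])
      = (fun acc line => if (!(sad && pvAccessDefaults.contains (PySem.Str.strip line))) = true
          then acc ++ [PySem.Str.rstrip line] else acc) := by
    funext acc line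
    cases h : sad && pvAccessDefaults.contains (PySem.Str.strip line) <;> simp
  simp only [hfun, PySem.List.foldl_append_if, List.nil_append]
  set klines : List String := List.map (fun line => PySem.Str.rstrip line)
    (List.filter (fun line => !(sad && pvAccessDefaults.contains (PySem.Str.strip line)))
      (PySem.Str.splitlines code)) with hklines
  have hk : ∀ m ∈ klines, PySem.Str.rstrip m = m := by
    intro m hm
    rw [hklines] at hm
    obtain ⟨line, _, rfl⟩ := List.mem_map.mp hm
    exact pv_rstrip_idem line
  -- A's two pop loops are the two dropWhile trims
  rw [pv_pop_eq klines hk]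
  have hk2 : ∀ m ∈ (klines.dropWhile (fun m => m == "")).reverse, PySem.Str.rstrip m = m := by
    intro m hm
    exact hk m ((List.dropWhile_sublist _).subset (List.mem_reverse.mp hm))
  rw [pv_pop_eq _ hk2]
  -- B's fold is pvStepC over klines; finish with the invariant
  rw [pv_fold_conv sad (PySem.Str.splitlines code) ([], 0), ← hklines]
  obtain ⟨_, _, hj⟩ := pv_invariant klines
  rw [hj]
  rfl
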